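-- pv_equiv track=rewrite | github.com/pmjoniak/popy | wprawki/w8.py | kompozycja
-- ===== SOURCE A (Python) =====
-- def kompozycja(A, znaki):
-- 	if len(A) == 0:
-- 		return ['']
-- 	a = A[0]
-- 	reszta = kompozycja(A[1:], znaki)
-- 	L = []
-- 	for r in reszta:
-- 		for z in znaki:
-- 			if len(r) == 0:
-- 				z = ''
-- 			L.append(a + z + r)
-- 			L.append('-' + a + z + r)
-- 	return L
-- ===== SOURCE B (Python) =====
-- def kompozycja(A, znaki):
--     acc = ['']
--     for a in reversed(A):
--         acc = [s
--                for r in acc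
--                for z in znaki
--                for s in (a + (z if r else '') + r,
--                          '-' + a + (z if r else '') + r)]
--     return acc
-- ===== Notes on version B (the rewrite author's own statement) =====
-- stated objective: alternative
-- what changed: Replaced A's head-first recursion on A with an iterative left fold over reversed(A) that rebuilds each level in one list comprehension instead of nested append loops.
import Mathlib
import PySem

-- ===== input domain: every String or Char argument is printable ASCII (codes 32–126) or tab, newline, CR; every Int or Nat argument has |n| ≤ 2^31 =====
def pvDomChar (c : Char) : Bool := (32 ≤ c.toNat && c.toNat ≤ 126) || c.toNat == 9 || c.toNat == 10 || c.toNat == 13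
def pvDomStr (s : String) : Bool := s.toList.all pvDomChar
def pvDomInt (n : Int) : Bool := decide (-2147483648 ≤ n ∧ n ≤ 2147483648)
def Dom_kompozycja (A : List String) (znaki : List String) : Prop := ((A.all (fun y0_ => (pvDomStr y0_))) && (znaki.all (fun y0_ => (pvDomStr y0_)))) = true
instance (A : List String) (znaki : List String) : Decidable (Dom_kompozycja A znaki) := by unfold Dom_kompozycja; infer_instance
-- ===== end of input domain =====

-- B replaces A's head-first recursion by an iterative left fold over reversed(A)
-- building each level with a comprehension (objective: alternative decomposition, same cost).


-- ===== PORT A =====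
-- literal port of A: structural recursion on A; inner nested loops append two strings
-- per (r, z) pair to an accumulator L, with z reset to '' when r is empty.
def kompozycja (A : List String) (znaki : List String) : List String :=
  match A with
  | [] => [""]
  | a :: rest =>
    let reszta := kompozycja rest znaki
    reszta.foldl (fun L r =>
      znaki.foldl (fun L z =>
        let z := if r = "" then "" else z
        (L ++ [a ++ z ++ r]) ++ ["-" ++ a ++ z ++ r]) L) []

-- ===== PORT B =====
-- literal port of B: fold over reversed(A); each level is built as one comprehension (flatMap).
def kompozycja_alt (A : List String) (znaki : List String) : List String :=
  A.reverse.foldl (fun acc a =>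
    acc.flatMap (fun r =>
      znaki.flatMap (fun z =>
        [a ++ (if r = "" then "" else z) ++ r,
         "-" ++ a ++ (if r = "" then "" else z) ++ r]))) [""]

-- ===== PRECONDITION & SPEC =====
def Spec_kompozycja (A : List String) (znaki : List String) (out : List String) : Prop := out = kompozycja_alt A znaki
instance (A : List String) (znaki : List String) (out : List String) : Decidable (Spec_kompozycja A znaki out) := by unfold Spec_kompozycja; infer_instance

-- ===== CLAIM (what is proved, stated in full; the proofs are below) =====
def Claim_equal_kompozycja : Prop := ∀ (A : List String) (znaki : List String), Dom_kompozycja A znaki → Spec_kompozycja A znaki (kompozycja A znaki)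

-- ===== LEMMAS AND PROOFS =====

-- A's inner double loop over (r, z) equals B's one-level comprehension.
theorem kompozycja_level (a : String) (znaki : List String) (xs L : List String) :
    xs.foldl (fun L r =>
      znaki.foldl (fun L z =>
        let z := if r = "" then "" else z
        (L ++ [a ++ z ++ r]) ++ ["-" ++ a ++ z ++ r]) L) L
    = L ++ xs.flatMap (fun r =>
        znaki.flatMap (fun z =>
          [a ++ (if r = "" then "" else z) ++ r,
           "-" ++ a ++ (if r = "" then "" else z) ++ r])) := by
  induction xs generalizing L with
  | nil => simp
  | cons r xs ih =>
    simp only [List.foldl_cons, List.flatMap_cons, ih]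
    have h : ∀ M : List String,
        znaki.foldl (fun L z =>
          let z := if r = "" then "" else z
          (L ++ [a ++ z ++ r]) ++ ["-" ++ a ++ z ++ r]) M
        = M ++ znaki.flatMap (fun z =>
            [a ++ (if r = "" then "" else z) ++ r,
             "-" ++ a ++ (if r = "" then "" else z) ++ r]) := by
      intro M
      induction znaki generalizing M with
      | nil => simp
      | cons z zs ihz => simp [ihz, List.flatMap]
    rw [h]
    simp

theorem kompozycja_eq (A znaki : List String) :
    kompozycja A znaki = kompozycja_alt A znaki := by
  induction A with
  | nil => rfl
  | cons a rest ih =>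
    show (kompozycja rest znaki).foldl _ [] = _
    rw [kompozycja_level, ih]
    unfold kompozycja_alt
    rw [List.reverse_cons, List.foldl_append]
    simp

-- ===== VERDICT (by name: the statement is the Claim_ definition above) =====
theorem kompozycja_spec : Claim_equal_kompozycja := by
  intro A znaki _
  exact kompozycja_eq A znaki
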